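-- pv_equiv track=rewrite | github.com/SamuelDeliens/PFE-2 | python/src/analyse/world.py | extract_available_periods
-- ===== SOURCE A (Python) =====
-- from typing import Dict, List, Tuple, Any, Set, Optional
-- from typing import Dict, List, Tuple, Any, Set, Optional
--
-- def extract_available_periods(sensor_data: Dict, gdp_data: List[Dict]) -> List[str]:
--     """
--     Extrait les périodes (année-mois) disponibles dans les données des capteurs
--     et vérifie la correspondance avec les années des données PIB
--     """
--     sensor_periods = set()
--     for country, periods in sensor_data.items():
--         for period in periods:
--             sensor_periods.add(period)
--
--     # Extraire les années des périodes (YYYY-MM -> YYYY)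
--     sensor_years = {period.split('-')[0] for period in sensor_periods}
--
--     gdp_years = set()
--     for country_data in gdp_data:
--         if "GDP" in country_data:
--             for year in country_data["GDP"]:
--                 gdp_years.add(year)
--
--     # Vérifier quelles années sont disponibles dans les deux jeux de données
--     valid_years = sorted(list(sensor_years.intersection(gdp_years)))
--
--     # Filtrer les périodes dont l'année est valide
--     valid_periods = sorted([period for period in sensor_periods
--                             if period.split('-')[0] in valid_years])
--
--     return valid_periods
-- ===== SOURCE B (Python) =====
-- def extract_available_periods(sensor_data, gdp_data):
--     # Index sensor periods by their year (prefix before the first '-').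
--     by_year = {}
--     for periods in sensor_data.values():
--         for p in periods:
--             by_year.setdefault(p.split('-')[0], set()).add(p)
--     gdp_years = set()
--     for country_data in gdp_data:
--         gdp_years.update(country_data.get("GDP", ()))
--     # Collect periods by looking up each common year in the index.
--     out = set()
--     for y in gdp_years & by_year.keys():
--         out |= by_year[y]
--     return sorted(out)
-- ===== Notes on version B (the rewrite author's own statement) =====
-- stated objective: alternative
-- what changed: B inverts the data flow: instead of collecting all sensor periods and filtering each one by re-splitting its year against a sorted intersection, it builds a year->periods index once while traversing sensor_data, then iterates over the GDP years and gathers the indexed periods for each common year, so no per-period membership test against the valid-years list remains.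
import Mathlib
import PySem

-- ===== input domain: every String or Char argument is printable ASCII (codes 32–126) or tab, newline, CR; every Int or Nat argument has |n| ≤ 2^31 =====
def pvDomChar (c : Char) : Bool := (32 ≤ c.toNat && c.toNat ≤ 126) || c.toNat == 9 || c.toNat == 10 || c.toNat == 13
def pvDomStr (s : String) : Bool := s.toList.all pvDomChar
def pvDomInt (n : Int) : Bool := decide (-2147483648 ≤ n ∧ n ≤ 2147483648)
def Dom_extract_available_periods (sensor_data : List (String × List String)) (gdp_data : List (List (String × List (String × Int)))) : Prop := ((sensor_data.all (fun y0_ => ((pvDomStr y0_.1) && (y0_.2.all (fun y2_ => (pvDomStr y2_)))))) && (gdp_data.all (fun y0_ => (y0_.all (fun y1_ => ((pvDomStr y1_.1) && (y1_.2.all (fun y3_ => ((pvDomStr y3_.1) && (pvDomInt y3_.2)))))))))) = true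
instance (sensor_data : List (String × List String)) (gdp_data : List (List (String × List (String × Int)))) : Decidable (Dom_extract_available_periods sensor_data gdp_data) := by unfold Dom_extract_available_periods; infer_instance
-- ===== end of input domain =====

-- B inverts the data flow: it indexes sensor periods by year once, then iterates the GDP years
-- and gathers the indexed periods of each common year, with no per-period filter (objective: alternative).

-- shared helper: period.split('-')[0]  (split with nonempty sep is total and always nonempty)
def pvYear (p : String) : String :=
  String.ofList ((PySem.Chars.splitOn p.toList ['-']).headD [])

-- ===== PORT A =====
def extract_available_periods (sensor_data : List (String × List String)) (gdp_data : List (List (String × List (String × Int)))) : List String :=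
  let sensor_periods : PySem.Set String :=
    sensor_data.foldl (fun s cp => cp.2.foldl (fun s period => PySem.Set.add s period) s) PySem.Set.empty
  let sensor_years : PySem.Set String :=
    PySem.Set.ofList (sensor_periods.map pvYear)
  let gdp_years : PySem.Set String :=
    gdp_data.foldl (fun g country_data =>
      match (PySem.Dict.mk country_data).get? "GDP" with   -- '"GDP" in country_data' then lookup
      | some years => years.foldl (fun g kv => PySem.Set.add g kv.1) g  -- iterate the inner dict's keys
      | none => g) PySem.Set.empty
  let valid_years : List String :=
    PySem.List.sorted (PySem.Set.inter sensor_years gdp_years) (fun x => x) false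
  PySem.List.sorted (sensor_periods.filter (fun period => valid_years.contains (pvYear period))) (fun x => x) false

-- ===== PORT B =====
def extract_available_periods_alt (sensor_data : List (String × List String)) (gdp_data : List (List (String × List (String × Int)))) : List String :=
  -- by_year.setdefault(p.split('-')[0], set()).add(p)  ≡  d[y] = d.get(y, set()) ∪ {p}  = Dict.modify
  let by_year : PySem.Dict String (PySem.Set String) :=
    sensor_data.foldl (fun d cp =>
      cp.2.foldl (fun d p => d.modify (pvYear p) PySem.Set.empty (fun s => PySem.Set.add s p)) d)
      PySem.Dict.empty
  let gdp_years : PySem.Set String :=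
    gdp_data.foldl (fun g country_data =>
      PySem.Set.update g (((PySem.Dict.mk country_data).getD "GDP" []).map Prod.fst)) PySem.Set.empty
  let out : PySem.Set String :=
    (PySem.Set.inter gdp_years by_year.keys).foldl
      (fun o y => PySem.Set.update o (by_year.getD y PySem.Set.empty)) PySem.Set.empty
  PySem.List.sorted out (fun x => x) false

-- ===== PRECONDITION & SPEC =====
def Spec_extract_available_periods (sensor_data : List (String × List String)) (gdp_data : List (List (String × List (String × Int)))) (out : List String) : Prop := out = extract_available_periods_alt sensor_data gdp_data
instance (sensor_data : List (String × List String)) (gdp_data : List (List (String × List (String × Int)))) (out : List String) : Decidable (Spec_extract_available_periods sensor_data gdp_data out) := by unfold Spec_extract_available_periods; infer_instance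

-- ===== CLAIM =====
def Claim_equal_extract_available_periods : Prop := ∀ (sensor_data : List (String × List String)) (gdp_data : List (List (String × List (String × Int)))), Dom_extract_available_periods sensor_data gdp_data → Spec_extract_available_periods sensor_data gdp_data (extract_available_periods sensor_data gdp_data)

-- ===== LEMMAS AND PROOFS =====

-- A's nested accumulation of all periods is set(flatMap snd sensor_data)
lemma sensorPeriods_eq (l : List (String × List String)) (s : PySem.Set String) :
    l.foldl (fun s cp => cp.2.foldl (fun s period => PySem.Set.add s period) s) s
      = PySem.Set.update s (l.flatMap Prod.snd) := by
  induction l generalizing s with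
  | nil => rfl
  | cons c t ih =>
      simp only [List.foldl_cons, List.flatMap_cons, PySem.Set.update_append, ih]
      rfl

-- A's and B's gdp_years loops compute the same set
lemma gdpYears_eq (l : List (List (String × List (String × Int)))) (g : PySem.Set String) :
    l.foldl (fun g country_data =>
        match (PySem.Dict.mk country_data).get? "GDP" with
        | some years => years.foldl (fun g kv => PySem.Set.add g kv.1) g
        | none => g) g
      = l.foldl (fun g country_data =>
        PySem.Set.update g (((PySem.Dict.mk country_data).getD "GDP" []).map Prod.fst)) g := by
  apply PySem.List.foldl_congr_mem
  intro g cd _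
  rw [PySem.Dict.getD_eq_get?_getD]
  cases h : (PySem.Dict.mk cd).get? "GDP" with
  | none => simp [PySem.Set.update]
  | some years => simp [PySem.Set.update_map_eq_foldl_add]

-- B's nested index-building fold is a single fold over the flattened period list
lemma byYear_flatten (l : List (String × List String)) (d : PySem.Dict String (PySem.Set String)) :
    l.foldl (fun d cp =>
        cp.2.foldl (fun d p => d.modify (pvYear p) PySem.Set.empty (fun s => PySem.Set.add s p)) d) d
      = (l.flatMap Prod.snd).foldl
          (fun d p => d.modify (pvYear p) PySem.Set.empty (fun s => PySem.Set.add s p)) d := by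
  induction l generalizing d with
  | nil => rfl
  | cons c t ih => simp only [List.foldl_cons, List.flatMap_cons, List.foldl_append, ih]

-- membership in a bucket of the index
lemma mem_byYear_getD (L : List String) (d : PySem.Dict String (PySem.Set String)) (y a : String) :
    a ∈ (L.foldl (fun d p => d.modify (pvYear p) PySem.Set.empty (fun s => PySem.Set.add s p)) d).getD y PySem.Set.empty
      ↔ a ∈ d.getD y PySem.Set.empty ∨ (a ∈ L ∧ pvYear a = y) := by
  induction L generalizing d with
  | nil => simp
  | cons p t ih =>
      simp only [List.foldl_cons, ih, PySem.Dict.getD_modify, List.mem_cons]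
      by_cases h : y = pvYear p
      · subst h
        rw [if_pos rfl]
        simp only [PySem.Set.mem_add]
        constructor
        · rintro (((hs | rfl) | ht)) 
          · exact Or.inl hs
          · exact Or.inr ⟨Or.inl rfl, rfl⟩
          · exact Or.inr ⟨Or.inr ht.1, ht.2⟩
        · rintro (hs | ⟨(rfl | ht), hy⟩)
          · exact Or.inl (Or.inl hs)
          · exact Or.inl (Or.inr rfl)
          · exact Or.inr ⟨ht, hy⟩
      · rw [if_neg h]
        constructor
        · rintro (hs | ht)
          · exact Or.inl hs
          · exact Or.inr ⟨Or.inr ht.1, ht.2⟩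
        · rintro (hs | ⟨(rfl | ht), hy⟩)
          · exact Or.inl hs
          · exact absurd hy.symm h
          · exact Or.inr ⟨ht, hy⟩

-- folding set-updates: membership
lemma mem_foldl_update {α β : Type} [BEq α] [LawfulBEq α] (ls : List β) (f : β → List α) (s : PySem.Set α) (a : α) :
    a ∈ ls.foldl (fun o y => PySem.Set.update o (f y)) s ↔ a ∈ s ∨ ∃ y ∈ ls, a ∈ f y := by
  induction ls generalizing s with
  | nil => simp
  | cons y t ih =>
      simp only [List.foldl_cons, ih, PySem.Set.mem_update, List.mem_cons]
      constructor
      · rintro ((hs | hf) | ⟨z, hz, hf⟩)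
        · exact Or.inl hs
        · exact Or.inr ⟨y, Or.inl rfl, hf⟩
        · exact Or.inr ⟨z, Or.inr hz, hf⟩
      · rintro (hs | ⟨z, (rfl | hz), hf⟩)
        · exact Or.inl (Or.inl hs)
        · exact Or.inl (Or.inr hf)
        · exact Or.inr ⟨z, hz, hf⟩

-- folding set-updates: nodup
lemma nodup_foldl_update {α β : Type} [BEq α] [LawfulBEq α] (ls : List β) (f : β → List α) (s : PySem.Set α)
    (hs : s.Nodup) : (ls.foldl (fun o y => PySem.Set.update o (f y)) s).Nodup := by
  induction ls generalizing s with
  | nil => exact hs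
  | cons y t ih => exact ih _ (PySem.Set.nodup_update _ _ hs)

theorem extract_available_periods_spec_aux (sensor_data : List (String × List String)) (gdp_data : List (List (String × List (String × Int)))) :
    extract_available_periods sensor_data gdp_data = extract_available_periods_alt sensor_data gdp_data := by
  unfold extract_available_periods extract_available_periods_alt
  simp only [sensorPeriods_eq, gdpYears_eq, byYear_flatten, PySem.Set.update_empty]
  set L : List String := sensor_data.flatMap Prod.snd with hL
  set G : PySem.Set String := gdp_data.foldl (fun g country_data =>
      PySem.Set.update g (((PySem.Dict.mk country_data).getD "GDP" []).map Prod.fst)) PySem.Set.empty with hG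
  set S : PySem.Set String := PySem.Set.ofList L with hS
  set D : PySem.Dict String (PySem.Set String) :=
    L.foldl (fun d p => d.modify (pvYear p) PySem.Set.empty (fun s => PySem.Set.add s p)) PySem.Dict.empty with hD
  -- keys of the index are exactly the years of L
  have hkeys : ∀ y, y ∈ D.keys ↔ y ∈ L.map pvYear := by
    intro y
    rw [hD, PySem.Dict.keys_foldl_modify_key]
    simp [PySem.Set.mem_update, PySem.Dict.keys_empty]
  -- bucket membership
  have hbucket : ∀ y a, a ∈ D.getD y PySem.Set.empty ↔ a ∈ L ∧ pvYear a = y := by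
    intro y a
    rw [hD, mem_byYear_getD]
    simp [PySem.Dict.getD_empty]
  -- the two filter predicates agree on members of S
  have hpred : ∀ p ∈ S,
      ((PySem.List.sorted (PySem.Set.inter (PySem.Set.ofList (S.map pvYear)) G) (fun x => x) false).contains (pvYear p))
        = G.contains (pvYear p) := by
    intro p hp
    have hy : pvYear p ∈ PySem.Set.ofList (S.map pvYear) := by
      rw [PySem.Set.mem_ofList]
      exact List.mem_map_of_mem hp
    rw [Bool.eq_iff_iff]
    simp only [List.contains_iff_mem, PySem.List.mem_sorted, PySem.Set.mem_inter]
    exact ⟨fun h => List.contains_iff_mem.mpr h.2, fun h => ⟨hy, List.contains_iff_mem.mp h⟩⟩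
  rw [List.filter_congr hpred]
  rw [PySem.List.sorted_id_eq_sorted_id_iff_perm]
  refine (List.perm_ext_iff_of_nodup ((PySem.Set.nodup_ofList L).filter _)
    (nodup_foldl_update _ _ _ List.nodup_nil)).mpr ?_
  intro a
  simp only [List.mem_filter, PySem.Set.mem_ofList, mem_foldl_update, PySem.Set.mem_inter,
    List.not_mem_nil, false_or]
  constructor
  · rintro ⟨haL, haG⟩
    exact ⟨pvYear a, ⟨List.contains_iff_mem.mp haG, (hkeys _).mpr (List.mem_map_of_mem haL)⟩, (hbucket _ _).mpr ⟨haL, rfl⟩⟩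
  · rintro ⟨y, ⟨hyG, _⟩, hab⟩
    obtain ⟨haL, rfl⟩ := (hbucket _ _).mp hab
    exact ⟨haL, List.contains_iff_mem.mpr hyG⟩

-- ===== VERDICT =====
theorem extract_available_periods_spec : Claim_equal_extract_available_periods := by
  intro sensor_data gdp_data _
  unfold Spec_extract_available_periods
  exact extract_available_periods_spec_aux sensor_data gdp_data
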